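-- pv_equiv track=rewrite | github.com/YunhoKim21/MathInterpreter | stringfunctions.py | doesCharExist
-- ===== SOURCE A (Python) =====
-- def doesCharExist(input, char):
--     value = 0
--     for i in range(0, len(input)):
--         if input[i] == "(":
--             value += 1
--         if input[i] == ")":
--             value -= 1
--         if input[i] == char and value == 0:
--             return True
--     return False
-- ===== SOURCE B (Python) =====
-- def doesCharExist(input, char):
--     candidates = [i for i, c in enumerate(input) if c == char]
--     return any(input[:i + 1].count("(") == input[:i + 1].count(")") for i in candidates)
-- ===== Notes on version B (the rewrite author's own statement) =====
-- stated objective: alternative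
-- what changed: B has no running-depth accumulator: it first collects the candidate positions where the character occurs, then tests each candidate by counting '(' and ')' in the prefix slice up to it and comparing the two counts (O(n*k) prefix recounting instead of A's single O(n) loop).
import Mathlib
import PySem

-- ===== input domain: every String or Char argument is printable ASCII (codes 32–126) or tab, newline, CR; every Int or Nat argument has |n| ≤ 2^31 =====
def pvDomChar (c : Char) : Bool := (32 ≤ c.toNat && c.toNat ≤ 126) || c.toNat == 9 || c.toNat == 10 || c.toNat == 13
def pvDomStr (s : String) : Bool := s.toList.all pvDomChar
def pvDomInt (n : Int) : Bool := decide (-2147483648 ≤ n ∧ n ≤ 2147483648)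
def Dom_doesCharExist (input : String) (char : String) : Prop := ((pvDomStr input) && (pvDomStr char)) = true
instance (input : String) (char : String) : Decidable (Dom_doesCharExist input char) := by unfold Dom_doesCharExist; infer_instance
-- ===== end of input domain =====

-- B first collects the candidate positions of char, then tests each for a balanced prefix by counting '(' and ')' in the prefix slice — no running-depth accumulator (alternative decomposition; not faster).


-- ===== PORT A =====
-- A's index loop with early return, as structural recursion over the character list carrying 'value'.
def pvGoA (char : String) : List Char → Int → Bool
  | [], _ => false
  | c :: rest, v =>
    let v1 := if c == '(' then v + 1 else v
    let v2 := if c == ')' then v1 - 1 else v1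
    if String.mk [c] == char && v2 == 0 then true else pvGoA char rest v2

def doesCharExist (input : String) (char : String) : Bool :=
  pvGoA char input.toList 0

-- ===== PORT B =====
-- Source B: collect candidate indices (enumerate + filter), then any(prefix-slice counts of '(' and ')' agree).
-- input[:i+1].count(c) is ported as (cs.take (i+1).toNat).count c; i comes from enumerate so i ≥ 0 and the slice is exact.
def doesCharExist_alt (input : String) (char : String) : Bool :=
  let cs := input.toList
  let candidates := ((PySem.List.enumerate cs).filter (fun p => String.mk [p.2] == char)).map (·.1)
  candidates.any (fun i => ((cs.take (i + 1).toNat).count '(') == ((cs.take (i + 1).toNat).count ')'))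

-- ===== PRECONDITION & SPEC =====
def Spec_doesCharExist (input : String) (char : String) (out : Bool) : Prop := out = doesCharExist_alt input char
instance (input : String) (char : String) (out : Bool) : Decidable (Spec_doesCharExist input char out) := by unfold Spec_doesCharExist; infer_instance

-- ===== CLAIM (what is proved, stated in full; the proofs are below) =====
def Claim_equal_doesCharExist : Prop := ∀ (input : String) (char : String), Dom_doesCharExist input char → Spec_doesCharExist input char (doesCharExist input char)

-- ===== LEMMAS AND PROOFS =====
def pvDelta (c : Char) : Int := if c == '(' then 1 else if c == ')' then -1 else 0

-- signed parenthesis balance of a prefix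
def pvIbal (l : List Char) : Int := (l.count '(' : Int) - (l.count ')' : Int)

theorem pvIbal_cons (c : Char) (t : List Char) : pvIbal (c :: t) = pvDelta c + pvIbal t := by
  unfold pvIbal pvDelta
  by_cases h1 : c = '(' <;> by_cases h2 : c = ')' <;> simp_all <;> push_cast <;> ring

theorem pvGoA_iff (char : String) (l : List Char) (v : Int) :
    pvGoA char l v = true ↔
      ∃ (k : Nat) (h : k < l.length), String.mk [l[k]] = char ∧ v + pvIbal (l.take (k + 1)) = 0 := by
  induction l generalizing v with
  | nil => simp [pvGoA]
  | cons c rest ih =>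
    have hd : (if c == ')' then (if c == '(' then v + 1 else v) - 1 else (if c == '(' then v + 1 else v)) = v + pvDelta c := by
      unfold pvDelta
      by_cases h1 : c = '(' <;> by_cases h2 : c = ')' <;> simp_all <;> ring
    have hnil : pvIbal ([] : List Char) = 0 := by simp [pvIbal]
    simp only [pvGoA, hd]
    by_cases h : (String.mk [c] == char && (v + pvDelta c) == 0) = true
    · simp only [h, if_pos]
      simp only [Bool.and_eq_true, beq_iff_eq] at h
      constructor
      · intro _
        refine ⟨0, by simp, by simpa using h.1, ?_⟩
        rw [List.take_succ_cons, List.take_zero, pvIbal_cons]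
        omega
      · intro _; trivial
    · rw [if_neg (by simpa using h), ih]
      constructor
      · rintro ⟨k, hk, hc, hb⟩
        refine ⟨k + 1, by simpa using hk, by simpa using hc, ?_⟩
        rw [List.take_succ_cons, pvIbal_cons]
        omega
      · rintro ⟨k, hk, hc, hb⟩
        match k, hk, hc, hb with
        | 0, hk, hc, hb =>
          exfalso
          apply h
          simp only [Bool.and_eq_true, beq_iff_eq]
          rw [List.take_succ_cons, List.take_zero, pvIbal_cons] at hb
          exact ⟨by simpa using hc, by omega⟩
        | k' + 1, hk, hc, hb =>
          refine ⟨k', by simpa using hk, by simpa using hc, ?_⟩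
          rw [List.take_succ_cons, pvIbal_cons] at hb
          omega

theorem alt_iff (input char : String) :
    doesCharExist_alt input char = true ↔
      ∃ (k : Nat) (h : k < input.toList.length),
        String.mk [input.toList[k]] = char ∧ pvIbal (input.toList.take (k + 1)) = 0 := by
  unfold doesCharExist_alt
  simp only [List.any_map, List.any_filter, List.any_eq_true, PySem.List.mem_enumerate_iff]
  constructor
  · rintro ⟨p, ⟨k, hk, rfl⟩, hp⟩
    simp only [Function.comp, zero_add] at hp
    obtain ⟨hc, hcount⟩ := Bool.and_eq_true_iff.mp hp
    refine ⟨k, hk, by simpa using hc, ?_⟩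
    have ht : ((k : Int) + 1).toNat = k + 1 := by omega
    rw [ht] at hcount
    unfold pvIbal
    have := beq_iff_eq.mp hcount
    omega
  · rintro ⟨k, hk, hc, hb⟩
    refine ⟨(0 + (k : Int), input.toList[k]), ⟨k, hk, rfl⟩, ?_⟩
    simp only [Function.comp, zero_add]
    apply Bool.and_eq_true_iff.mpr
    have ht : ((k : Int) + 1).toNat = k + 1 := by omega
    rw [ht]
    refine ⟨by simpa using hc, ?_⟩
    unfold pvIbal at hb
    exact beq_iff_eq.mpr (by omega)

-- ===== VERDICT (by name: the statement is the Claim_ definition above) =====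
theorem doesCharExist_spec : Claim_equal_doesCharExist := by
  intro input char _
  unfold Spec_doesCharExist doesCharExist
  rw [Bool.eq_iff_iff, pvGoA_iff, alt_iff]
  simp only [zero_add]
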